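-- pv_equiv track=rewrite | github.com/facebookresearch/fbpcs | fbpmp/private_lift/service/privatelift.py | calculate_file_start_index_and_num_shards
-- ===== SOURCE A (Python) =====
-- from typing import DefaultDict, Dict, List, Optional, Any, TypeVar, Tuple, Iterator
--
-- def calculate_file_start_index_and_num_shards(
--
--     input_files: List[str],
--     num_containers: int,
-- ) -> Iterator[Tuple[int, int]]:
--     """
--     Calculate the file start index and number of shards to run per worker
--     Examples:
--     len(input_files) = 4, num_containers = 4 -> [(0, 1), (1, 1), (2, 1), (3, 1)]
--     len(input_files) = 5, num_containers = 4 -> [(0, 2), (2, 1), (3, 1), (4, 1)]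
--     len(input_files) = 6, num_containers = 4 -> [(0, 2), (2, 2), (4, 1), (5, 1)]
--     len(input_files) = 7, num_containers = 4 -> [(0, 2), (2, 2), (4, 2), (6, 1)]
--     len(input_files) = 8, num_containers = 4 -> [(0, 2), (2, 2), (4, 2), (6, 2)]
--     """
--     file_start_index = 0
--     for i in range(num_containers):
--         num_files = len(input_files[i::num_containers])
--         yield file_start_index, num_files
--         file_start_index += num_files
-- ===== SOURCE B (Python) =====
-- def calculate_file_start_index_and_num_shards(input_files, num_containers):
--     """Closed form: shard counts and start indices from one divmod, no slicing."""
--     n = len(input_files)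
--     if num_containers > 0:
--         q, r = divmod(n, num_containers)
--         for i in range(num_containers):
--             yield (i * q + min(i, r), q + 1 if i < r else q)
-- ===== Notes on version B (the rewrite author's own statement) =====
-- stated objective: alternative
-- what changed: B replaces A's per-container list slicing input_files[i::num_containers] by one divmod of len(input_files) and a closed-form (start, count) = (i*q + min(i,r), q + (1 if i < r else 0)) per container, so the file list is never traversed.
import Mathlib
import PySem

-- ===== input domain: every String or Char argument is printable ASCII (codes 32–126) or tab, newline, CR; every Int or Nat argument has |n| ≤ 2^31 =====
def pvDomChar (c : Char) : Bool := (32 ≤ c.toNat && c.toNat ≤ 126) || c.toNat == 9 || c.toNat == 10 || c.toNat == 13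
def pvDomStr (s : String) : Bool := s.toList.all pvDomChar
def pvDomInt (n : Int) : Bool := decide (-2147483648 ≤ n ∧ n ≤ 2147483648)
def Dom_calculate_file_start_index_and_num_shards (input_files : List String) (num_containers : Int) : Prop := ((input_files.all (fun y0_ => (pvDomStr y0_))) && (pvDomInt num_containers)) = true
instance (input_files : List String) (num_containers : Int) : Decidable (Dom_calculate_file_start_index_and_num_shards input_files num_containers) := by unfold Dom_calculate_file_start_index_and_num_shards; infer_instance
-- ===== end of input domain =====

-- B computes each container's (start, count) by divmod arithmetic instead of slicing the file list (objective: alternative).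
-- Note: Python A is a generator; per convention its fully drawn sequence is the List compared here.

-- ===== PORT A =====
-- loop state: (file_start_index, yielded pairs so far); xs[i::num_containers] is
-- PySem.List.slice?; its `.getD []` never fires inside the loop (step = num_containers ≥ 1 there).
def calculate_file_start_index_and_num_shards (input_files : List String) (num_containers : Int) : List (Int × Int) :=
  ((PySem.List.pyRange 0 num_containers 1).foldl
    (fun (st : Int × List (Int × Int)) i =>
      let num_files : Int :=
        ((PySem.List.slice? input_files (some i) none num_containers).getD []).length
      (st.1 + num_files, st.2 ++ [(st.1, num_files)]))
    (0, [])).2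

-- ===== PORT B =====
def calculate_file_start_index_and_num_shards_alt (input_files : List String) (num_containers : Int) : List (Int × Int) :=
  let n : Int := input_files.length
  if 0 < num_containers then
    let q := PySem.Int.floordiv n num_containers
    let r := PySem.Int.mod n num_containers
    (PySem.List.pyRange 0 num_containers 1).map
      (fun i => (i * q + min i r, if i < r then q + 1 else q))
  else []

-- ===== PRECONDITION & SPEC =====
def Spec_calculate_file_start_index_and_num_shards (input_files : List String) (num_containers : Int) (out : List (Int × Int)) : Prop := out = calculate_file_start_index_and_num_shards_alt input_files num_containers
instance (input_files : List String) (num_containers : Int) (out : List (Int × Int)) : Decidable (Spec_calculate_file_start_index_and_num_shards input_files num_containers out) := by unfold Spec_calculate_file_start_index_and_num_shards; infer_instance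

-- ===== CLAIM (what is proved, stated in full; the proofs are below) =====
def Claim_equal_calculate_file_start_index_and_num_shards : Prop := ∀ (input_files : List String) (num_containers : Int), Dom_calculate_file_start_index_and_num_shards input_files num_containers → Spec_calculate_file_start_index_and_num_shards input_files num_containers (calculate_file_start_index_and_num_shards input_files num_containers)

-- ===== LEMMAS AND PROOFS =====

-- length of a filterMap of in-range lookups
lemma pv_filterMap_len {α : Type} (xs : List α) (g : Nat → Nat) (m : Nat)
    (h : ∀ k < m, g k < xs.length) :
    (List.filterMap (fun k => xs[g k]?) (List.range m)).length = m := by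
  induction m with
  | zero => simp
  | succ m ih =>
    rw [List.range_succ, List.filterMap_append, List.length_append,
        ih (fun k hk => h k (Nat.lt_succ_of_lt hk))]
    simp [List.getElem?_eq_getElem (h m (Nat.lt_succ_self m))]

-- length of xs[i::c] for 0 ≤ i, 0 < c, in closed form
lemma pv_slice_len {α : Type} (xs : List α) (i c : Int) (h0 : 0 ≤ i) (hc : 0 < c) :
    (((PySem.List.slice? xs (some i) none c).getD []).length : Int)
      = if i < (xs.length : Int) then (xs.length - i + c - 1) / c else 0 := by
  unfold PySem.List.slice? PySem.List.sliceIndices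
  rw [if_neg hc.ne', if_neg (by omega : ¬ c < 0)]
  simp only [if_pos hc, if_neg (not_lt.mpr h0), if_neg (not_lt.mpr hc.le)]
  by_cases hin : i < (xs.length : Int)
  · rw [min_eq_left hin.le, if_pos hin, if_pos hin]
    set cnt : Int := ((xs.length : Int) - i + c - 1) / c with hcnt
    have hcnt0 : 0 ≤ cnt := Int.ediv_nonneg (by omega) hc.le
    have hmul : cnt * c ≤ (xs.length : Int) - i + c - 1 := Int.ediv_mul_le _ hc.ne'
    rw [Option.getD_some, pv_filterMap_len]
    · exact Int.toNat_of_nonneg hcnt0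
    · intro k hk
      have hk' : (k : Int) ≤ cnt - 1 := by omega
      have h1 : c * (k : Int) ≤ c * (cnt - 1) :=
        mul_le_mul_of_nonneg_left hk' hc.le
      have h2 : i + c * (k : Int) < (xs.length : Int) := by nlinarith
      have h3 : 0 ≤ i + c * (k : Int) := by positivity
      omega
  · rw [min_eq_right (not_lt.mp hin), if_neg (lt_irrefl _), if_neg hin]
    simp

-- the closed-form count equals divmod form
lemma pv_count_closed (n i c : Int) (hn : 0 ≤ n) (h0 : 0 ≤ i) (hic : i < c) :
    (if i < n then (n - i + c - 1) / c else 0)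
      = if i < PySem.Int.mod n c then PySem.Int.floordiv n c + 1 else PySem.Int.floordiv n c := by
  have hc : 0 < c := lt_of_le_of_lt h0 hic
  rw [PySem.Int.mod_eq_emod_of_pos hc, PySem.Int.floordiv_eq_ediv_of_pos hc]
  have hqr : c * (n / c) + n % c = n := Int.ediv_add_emod n c
  have hr0 : 0 ≤ n % c := Int.emod_nonneg n (by omega)
  have hrc : n % c < c := Int.emod_lt_of_pos n hc
  by_cases hin : i < n
  · rw [if_pos hin, ← PySem.Int.floordiv_eq_ediv_of_pos hc]
    by_cases hir : i < n % c
    · rw [if_pos hir, (PySem.Int.floordiv_eq_iff_of_pos hc)]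
      constructor <;> nlinarith [hqr]
    · rw [if_neg hir, (PySem.Int.floordiv_eq_iff_of_pos hc)]
      constructor <;> nlinarith [hqr]
  · rw [if_neg hin]
    have hnc : n < c := by omega
    have hq : n / c = 0 := Int.ediv_eq_zero_of_lt hn hnc
    have hrn : n % c = n := Int.emod_eq_of_lt hn hnc
    rw [hq, hrn, if_neg (by omega)]

-- the loop, from any container index a, yields the closed-form pairs
lemma pv_loop (xs : List String) (c : Int) (hc : 0 < c) :
    ∀ (m : Nat) (a : Int) (acc : List (Int × Int)), 0 ≤ a → a + m = c →
    ((PySem.List.pyRange a c 1).foldl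
      (fun (st : Int × List (Int × Int)) i =>
        let num_files : Int :=
          ((PySem.List.slice? xs (some i) none c).getD []).length
        (st.1 + num_files, st.2 ++ [(st.1, num_files)]))
      (a * PySem.Int.floordiv xs.length c + min a (PySem.Int.mod xs.length c), acc)).2
    = acc ++ (PySem.List.pyRange a c 1).map
        (fun i => (i * PySem.Int.floordiv xs.length c + min i (PySem.Int.mod xs.length c),
          if i < PySem.Int.mod xs.length c then PySem.Int.floordiv xs.length c + 1
          else PySem.Int.floordiv xs.length c)) := by
  intro m
  induction m with
  | zero =>
    intro a acc h0 hend
    rw [PySem.List.pyRange_one_eq_nil (by omega)]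
    simp
  | succ m ih =>
    intro a acc h0 hend
    have hac : a < c := by omega
    rw [PySem.List.pyRange_one_cons hac]
    simp only [List.foldl_cons, List.map_cons]
    have hnf : (((PySem.List.slice? xs (some a) none c).getD []).length : Int)
        = if a < PySem.Int.mod xs.length c then PySem.Int.floordiv xs.length c + 1
          else PySem.Int.floordiv xs.length c := by
      rw [pv_slice_len xs a c h0 hc, pv_count_closed _ _ _ (by positivity) h0 hac]
    have hr0 : 0 ≤ PySem.Int.mod (xs.length : Int) c := PySem.Int.mod_nonneg _ hc
    have hstep : a * PySem.Int.floordiv xs.length c + min a (PySem.Int.mod xs.length c)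
        + (if a < PySem.Int.mod xs.length c then PySem.Int.floordiv xs.length c + 1
           else PySem.Int.floordiv xs.length c)
        = (a+1) * PySem.Int.floordiv xs.length c + min (a+1) (PySem.Int.mod xs.length c) := by
      by_cases har : a < PySem.Int.mod xs.length c
      · rw [if_pos har, min_eq_left (by omega), min_eq_left (by omega)]; ring
      · rw [if_neg har, min_eq_right (by omega), min_eq_right (by omega)]; ring
    rw [hnf, hstep]
    rw [ih (a+1) (acc ++ [(a * PySem.Int.floordiv xs.length c + min a (PySem.Int.mod xs.length c),
      if a < PySem.Int.mod xs.length c then PySem.Int.floordiv xs.length c + 1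
      else PySem.Int.floordiv xs.length c)]) (by omega) (by omega)]
    simp

-- ===== VERDICT (by name: the statement is the Claim_ definition above) =====
theorem calculate_file_start_index_and_num_shards_spec : Claim_equal_calculate_file_start_index_and_num_shards := by
  intro xs c _
  unfold Spec_calculate_file_start_index_and_num_shards
  unfold calculate_file_start_index_and_num_shards calculate_file_start_index_and_num_shards_alt
  by_cases hc : 0 < c
  · simp only [hc, if_pos]
    have h := pv_loop xs c hc c.toNat 0 [] le_rfl (by omega)
    have e0 : (0:Int) * PySem.Int.floordiv xs.length c + min 0 (PySem.Int.mod xs.length c) = 0 := by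
      have hr := PySem.Int.mod_nonneg (xs.length:Int) hc
      simp [min_eq_left hr]
    rw [e0] at h
    simpa using h
  · rw [PySem.List.pyRange_one_eq_nil (by omega)]
    simp [hc]
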